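-- pv_equiv track=rewrite | github.com/shubhamkaushal765/ac_roster | new.py | build_model_inputs
-- ===== SOURCE A (Python) =====
-- slot_length = 15
--
-- def hhmm_to_slot(hhmm: str, slot_length=slot_length, NUM_SLOTS = 48):
--     """Convert 'HHMM' string to slot index. Default slot = 30 min."""
--     t = int(hhmm)
--     h = t // 100
--     m = t % 100
--     slot = (h - 10) * 4 + (m // slot_length)
--     return max(0, min(NUM_SLOTS - 1, slot))
--
-- def calculate_total_break2(officer_intervals):
--     officers_break_quota = {}
--     for officer in officer_intervals:
--         total_break = 0
--         for each_interval in officer_intervals[officer]: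
--             s, e = each_interval
--             if e - s >= 36:   # >= 9 hours
--                 total_break = 8
--                 break
--             elif e - s >= 20: # >= 5 hours
--                 total_break = max(total_break, 3)
--             elif e - s >= 10: # >= 2.5 hours
--                 total_break = max(total_break, 2)
--         officers_break_quota[officer] = total_break
--     return officers_break_quota
--
-- def build_model_inputs(input_avail: list[str], slot_length=slot_length):
--     officers = [f"O{i+1}" for i in range(len(input_avail))]
--     counters = [f"C{i+1}" for i in range(40)]  # 40 counters
--
--     # Step 1: Parse availability into intervals per officer
--     sos_availability = {}
--     availability = {}
--     for i, avail_str in enumerate(input_avail):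
--         intervals = [s.strip() for s in avail_str.split(",") if s.strip()]
--         officer_intervals = []
--         slots_set = set()
--         for interval in intervals:
--             start_str, end_str = interval.split("-")
--             start_slot = hhmm_to_slot(start_str, slot_length)
--             end_slot = hhmm_to_slot(end_str, slot_length)
--             officer_intervals.append((start_slot, end_slot))
--             slots_set.update(range(start_slot, end_slot))
--         sos_availability[officers[i]] = officer_intervals
--         availability[officers[i]] = officer_intervals
--
--     # Step 2: Calculate break requirements per officer
--     break_requirements = calculate_total_break2(sos_availability)
--
--     return officers, counters, availability, break_requirements
-- ===== SOURCE B (Python) =====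
-- slot_length = 15
--
-- def _hhmm_slot(hhmm, slot_length):
--     t = int(hhmm)
--     slot = (t // 100 - 10) * 4 + (t % 100) // slot_length
--     return max(0, min(47, slot))
--
-- def build_model_inputs(input_avail: list[str], slot_length=slot_length):
--     officers = ["O%d" % (i + 1) for i in range(len(input_avail))]
--     counters = ["C%d" % (i + 1) for i in range(40)]
--     availability = {}
--     break_requirements = {}
--     for name, avail_str in zip(officers, input_avail):
--         intervals = []
--         quota = 0
--         for part in avail_str.split(","):
--             part = part.strip()
--             if not part:
--                 continue
--             start_str, end_str = part.split("-")
--             s = _hhmm_slot(start_str, slot_length)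
--             e = _hhmm_slot(end_str, slot_length)
--             intervals.append((s, e))
--             d = e - s
--             quota = max(quota, 8 if d >= 36 else 3 if d >= 20 else 2 if d >= 10 else 0)
--         availability[name] = intervals
--         break_requirements[name] = quota
--     return officers, counters, availability, break_requirements
-- ===== Notes on version B (the rewrite author's own statement) =====
-- stated objective: simpler
-- what changed: B fuses parsing and break-quota computation into one pass per officer (accumulating the quota as a running max of a threshold function over interval durations), eliminating the calculate_total_break2 second scan, the duplicate sos_availability dict and the unused slots_set.
import Mathlib
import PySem

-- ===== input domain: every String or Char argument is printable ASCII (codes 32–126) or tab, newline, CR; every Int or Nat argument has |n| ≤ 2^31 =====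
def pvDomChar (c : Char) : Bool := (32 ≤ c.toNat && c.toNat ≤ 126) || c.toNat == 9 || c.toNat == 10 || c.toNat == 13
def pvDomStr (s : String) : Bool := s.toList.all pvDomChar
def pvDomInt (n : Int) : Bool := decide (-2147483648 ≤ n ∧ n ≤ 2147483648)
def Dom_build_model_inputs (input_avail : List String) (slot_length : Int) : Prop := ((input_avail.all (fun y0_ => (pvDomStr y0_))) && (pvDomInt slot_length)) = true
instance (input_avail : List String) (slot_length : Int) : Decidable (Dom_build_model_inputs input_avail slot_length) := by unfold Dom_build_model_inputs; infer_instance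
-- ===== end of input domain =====

-- B fuses parsing and break-quota computation into one pass per officer (dropping the
-- second scan, the duplicate dict and the unused slots set); same return value on Pre_.


-- ===== PORT A =====
-- hhmm_to_slot (Python raises on non-int strings / slot_length = 0; those inputs are outside
-- Pre_, where the port's `.getD` defaults are never reached)
def pvHhmmToSlotA (hhmm : String) (slot_length : Int) : Int :=
  let t := (PySem.Int.ofStr? hhmm).getD 0
  let h := PySem.Int.floordiv t 100
  let m := PySem.Int.mod t 100
  let slot := (h - 10) * 4 + (PySem.Int.floordiv? m slot_length).getD 0
  max 0 (min (48 - 1) slot)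

-- inner loop of calculate_total_break2 (the `break` becomes an early return of 8)
def pvBreakLoopA : List (Int × Int) → Int → Int
  | [], total_break => total_break
  | (s, e) :: rest, total_break =>
    if e - s ≥ 36 then 8
    else if e - s ≥ 20 then pvBreakLoopA rest (max total_break 3)
    else if e - s ≥ 10 then pvBreakLoopA rest (max total_break 2)
    else pvBreakLoopA rest total_break

-- calculate_total_break2
def pvCalcTotalBreak2 (officer_intervals : PySem.Dict String (List (Int × Int))) : PySem.Dict String Int :=
  officer_intervals.keys.foldl
    (fun acc officer => acc.insert officer (pvBreakLoopA ((officer_intervals.get? officer).getD []) 0))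
    PySem.Dict.empty

-- per-officer parsing loop of A: the list comprehension, then the fold building
-- (officer_intervals, slots_set); a `[start,end]`-shaped split is guaranteed by Pre_
-- (`.getD []` on split? is never reached: the separators are non-empty)
def pvParseOfficerA (avail_str : String) (slot_length : Int) : List (Int × Int) × PySem.Set Int :=
  ((((PySem.Str.split? avail_str ",").getD []).map PySem.Str.strip).filter (fun t => t ≠ "")).foldl
    (fun st interval =>
      match (PySem.Str.split? interval "-").getD [] with
      | [start_str, end_str] =>
        (st.1 ++ [(pvHhmmToSlotA start_str slot_length, pvHhmmToSlotA end_str slot_length)],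
         PySem.Set.update st.2 (PySem.List.pyRange (pvHhmmToSlotA start_str slot_length) (pvHhmmToSlotA end_str slot_length) 1))
      | _ => st)  -- ValueError in Python: outside Pre_
    ([], PySem.Set.empty)

def pvOfficersA (k : Nat) : List String := (List.range k).map (fun i : Nat => "O" ++ PySem.Int.toStr ((i : Int) + 1))
def pvCountersA : List String := (List.range 40).map (fun i : Nat => "C" ++ PySem.Int.toStr ((i : Int) + 1))

-- body of A's `for i, avail_str in enumerate(input_avail)` loop (two dicts, same inserts)
def pvStepTopA (officers : List String) (slot_length : Int)
    (sa : PySem.Dict String (List (Int × Int)) × PySem.Dict String (List (Int × Int)))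
    (p : Int × String) : PySem.Dict String (List (Int × Int)) × PySem.Dict String (List (Int × Int)) :=
  (sa.1.insert ((PySem.List.pyGet? officers p.1).getD "") (pvParseOfficerA p.2 slot_length).1,
   sa.2.insert ((PySem.List.pyGet? officers p.1).getD "") (pvParseOfficerA p.2 slot_length).1)

def build_model_inputs (input_avail : List String) (slot_length : Int) :
    List String × List String × (List (String × List (Int × Int))) × (List (String × Int)) :=
  let officers := pvOfficersA input_avail.length
  let counters := pvCountersA
  let sa := (PySem.List.enumerate input_avail).foldl (pvStepTopA officers slot_length)
    (PySem.Dict.empty, PySem.Dict.empty)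
  (officers, counters, sa.2.items, (pvCalcTotalBreak2 sa.1).items)

-- ===== PORT B =====
def pvSlotB (hhmm : String) (slot_length : Int) : Int :=
  let t := (PySem.Int.ofStr? hhmm).getD 0
  max 0 (min 47 ((PySem.Int.floordiv t 100 - 10) * 4 + (PySem.Int.floordiv? (PySem.Int.mod t 100) slot_length).getD 0))

-- body of B's inner loop: parse one comma-piece, extend intervals, bump the quota max
def pvStepB (slot_length : Int) (st : List (Int × Int) × Int) (part : String) : List (Int × Int) × Int :=
  let t := PySem.Str.strip part
  if t = "" then st
  else
    match (PySem.Str.split? t "-").getD [] with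
    | [start_str, end_str] =>
      let s := pvSlotB start_str slot_length
      let e := pvSlotB end_str slot_length
      let d := e - s
      (st.1 ++ [(s, e)], max st.2 (if d ≥ 36 then 8 else if d ≥ 20 then 3 else if d ≥ 10 then 2 else 0))
    | _ => st  -- ValueError in Python: outside Pre_
def pvRowB (slot_length : Int) (avail_str : String) : List (Int × Int) × Int :=
  ((PySem.Str.split? avail_str ",").getD []).foldl (pvStepB slot_length) ([], 0)

def pvOfficersB (k : Nat) : List String := (List.range k).map (fun i : Nat => "O" ++ PySem.Int.toStr ((i : Int) + 1))
def pvCountersB : List String := (List.range 40).map (fun i : Nat => "C" ++ PySem.Int.toStr ((i : Int) + 1))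

-- body of B's `for name, avail_str in zip(officers, input_avail)` loop
def pvStepTopB (slot_length : Int)
    (ab : PySem.Dict String (List (Int × Int)) × PySem.Dict String Int)
    (p : String × String) : PySem.Dict String (List (Int × Int)) × PySem.Dict String Int :=
  (ab.1.insert p.1 (pvRowB slot_length p.2).1, ab.2.insert p.1 (pvRowB slot_length p.2).2)

def build_model_inputs_alt (input_avail : List String) (slot_length : Int) :
    List String × List String × (List (String × List (Int × Int))) × (List (String × Int)) :=
  let officers := pvOfficersB input_avail.length
  let ab := (officers.zip input_avail).foldl (pvStepTopB slot_length) (PySem.Dict.empty, PySem.Dict.empty)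
  (officers, pvCountersB, ab.1.items, ab.2.items)

-- ===== PRECONDITION & SPEC =====
-- Pre_ excludes exactly the inputs where the Python A raises: a nonempty comma-piece that does not
-- split on "-" into exactly two int()-parsable strings (ValueError), or slot_length = 0 with at
-- least one piece present (ZeroDivisionError). B raises there too.
def Pre_build_model_inputs (input_avail : List String) (slot_length : Int) : Prop :=
  ∀ a ∈ input_avail,
    ∀ t ∈ (((PySem.Str.split? a ",").getD []).map PySem.Str.strip).filter (fun t => t ≠ ""),
      ((PySem.Str.split? t "-").getD []).length = 2 ∧
      (∀ p ∈ (PySem.Str.split? t "-").getD [], (PySem.Int.ofStr? p).isSome = true) ∧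
      slot_length ≠ 0
instance (input_avail : List String) (slot_length : Int) : Decidable (Pre_build_model_inputs input_avail slot_length) := by
  unfold Pre_build_model_inputs; infer_instance

def pvWitness_build_model_inputs : List String × Int := (["1000-1200, 1300-1500", ""], 15)

def Spec_build_model_inputs (input_avail : List String) (slot_length : Int)
    (out : List String × List String × (List (String × List (Int × Int))) × (List (String × Int))) : Prop :=
  out = build_model_inputs_alt input_avail slot_length
instance (input_avail : List String) (slot_length : Int)
    (out : List String × List String × (List (String × List (Int × Int))) × (List (String × Int))) :
    Decidable (Spec_build_model_inputs input_avail slot_length out) := by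
  unfold Spec_build_model_inputs
  letI d1 : DecidableEq (List (String × List (Int × Int))) := inferInstance
  letI d2 : DecidableEq (List (String × Int)) := inferInstance
  letI d3 : DecidableEq (List (String × List (Int × Int)) × List (String × Int)) := instDecidableEqProd
  letI d4 : DecidableEq (List String × List (String × List (Int × Int)) × List (String × Int)) := instDecidableEqProd
  letI d5 : DecidableEq (List String × List String × List (String × List (Int × Int)) × List (String × Int)) := instDecidableEqProd
  exact d5 _ _

-- ===== CLAIM (what is proved, stated in full; the proofs are below) =====
def Claim_equal_build_model_inputs : Prop := ∀ (input_avail : List String) (slot_length : Int), Dom_build_model_inputs input_avail slot_length → Pre_build_model_inputs input_avail slot_length → Spec_build_model_inputs input_avail slot_length (build_model_inputs input_avail slot_length)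

-- ===== LEMMAS AND PROOFS =====

-- decimal decoding: a left inverse of Nat.toDigits 10, used to get injectivity of officer names
def pvDec (cs : List Char) : Nat := cs.foldl (fun a c => 10 * a + (c.toNat - 48)) 0

theorem pvDigitChar_val (d : Nat) (hd : d < 10) : (Nat.digitChar d).toNat - 48 = d := by
  interval_cases d <;> rfl

theorem pvDec_append (l : List Char) (c : Char) : pvDec (l ++ [c]) = 10 * pvDec l + (c.toNat - 48) := by
  simp [pvDec, List.foldl_append]

theorem pvDec_toDigits : ∀ n : Nat, pvDec (Nat.toDigits 10 n) = n := by
  intro n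
  induction n using Nat.strong_induction_on with
  | _ n ih =>
    rw [Nat.toDigits_eq_if (by norm_num)]
    by_cases h : n < 10
    · simp [h, pvDec, pvDigitChar_val n h]
    · rw [if_neg h, pvDec_append, ih (n / 10) (Nat.div_lt_self (by omega) (by norm_num)),
        pvDigitChar_val _ (Nat.mod_lt _ (by norm_num))]
      omega

theorem pvNameA_injective : Function.Injective (fun i : Nat => "O" ++ PySem.Int.toStr ((i : Int) + 1)) := by
  intro i j h
  have h1 := congrArg String.toList h
  simp only [String.toList_append, PySem.Int.toList_toStr, PySem.Int.toChars] at h1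
  rw [if_neg (by omega), if_neg (by omega)] at h1
  have h2 : Nat.toDigits 10 ((i : Int) + 1).toNat = Nat.toDigits 10 ((j : Int) + 1).toNat :=
    List.append_cancel_left h1
  have h3 := congrArg pvDec h2
  rw [pvDec_toDigits, pvDec_toDigits] at h3
  omega

theorem pvOfficersA_nodup (k : Nat) : (pvOfficersA k).Nodup := by
  unfold pvOfficersA
  exact List.Nodup.map pvNameA_injective List.nodup_range

theorem pvOfficersB_eq (k : Nat) : pvOfficersB k = pvOfficersA k := rfl

theorem pvOfficersA_length (k : Nat) : (pvOfficersA k).length = k := by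
  simp [pvOfficersA]

theorem pvSlot_eq (h : String) (sl : Int) : pvHhmmToSlotA h sl = pvSlotB h sl := by
  simp [pvHhmmToSlotA, pvSlotB]

-- threshold function: the value A's inner loop assigns for one interval of duration d
def pvThresh (d : Int) : Int := if d ≥ 36 then 8 else if d ≥ 20 then 3 else if d ≥ 10 then 2 else 0
-- slot pair of one (length-2-splitting) piece
def pvPair (sl : Int) (t : String) : Int × Int :=
  match (PySem.Str.split? t "-").getD [] with
  | [x, y] => (pvSlotB x sl, pvSlotB y sl)
  | _ => (0, 0)

theorem pvThresh_le (d : Int) : pvThresh d ≤ 8 := by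
  unfold pvThresh; split_ifs <;> omega

theorem pvFoldMax_eight (ivs : List (Int × Int)) :
    ivs.foldl (fun q iv => max q (pvThresh (iv.2 - iv.1))) 8 = 8 := by
  induction ivs with
  | nil => rfl
  | cons iv rest ih =>
    have := pvThresh_le (iv.2 - iv.1)
    simpa [show max (8:Int) (pvThresh (iv.2 - iv.1)) = 8 by omega] using ih

theorem pvBreakLoopA_eq_foldl : ∀ (ivs : List (Int × Int)) (tb : Int), 0 ≤ tb → tb ≤ 8 →
    pvBreakLoopA ivs tb = ivs.foldl (fun q iv => max q (pvThresh (iv.2 - iv.1))) tb := by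
  intro ivs
  induction ivs with
  | nil => intro tb _ _; rfl
  | cons iv rest ih =>
    intro tb htb0 htb8
    obtain ⟨s, e⟩ := iv
    by_cases h36 : e - s ≥ 36
    · simp only [pvBreakLoopA, if_pos h36, List.foldl_cons]
      rw [show max tb (pvThresh ((s, e).2 - (s, e).1)) = 8 by simp only [pvThresh]; simp [h36]; omega]
      exact (pvFoldMax_eight rest).symm
    · by_cases h20 : e - s ≥ 20
      · simp only [pvBreakLoopA, if_neg h36, if_pos h20, List.foldl_cons]
        rw [ih (max tb 3) (by omega) (by omega),
          show max tb (pvThresh ((s, e).2 - (s, e).1)) = max tb 3 by simp [pvThresh, h36, h20]]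
      · by_cases h10 : e - s ≥ 10
        · simp only [pvBreakLoopA, if_neg h36, if_neg h20, if_pos h10, List.foldl_cons]
          rw [ih (max tb 2) (by omega) (by omega),
            show max tb (pvThresh ((s, e).2 - (s, e).1)) = max tb 2 by simp [pvThresh, h36, h20, h10]]
        · simp only [pvBreakLoopA, if_neg h36, if_neg h20, if_neg h10, List.foldl_cons]
          rw [ih tb htb0 htb8,
            show max tb (pvThresh ((s, e).2 - (s, e).1)) = tb by simp [pvThresh, h36, h20, h10]; omega]

-- A's per-officer fold: the intervals component is the pvPair map
theorem pvParseA_fst (sl : Int) :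
    ∀ (l : List String) (init : List (Int × Int) × PySem.Set Int),
      (∀ t ∈ l, ((PySem.Str.split? t "-").getD []).length = 2) →
      (l.foldl (fun st interval =>
        match (PySem.Str.split? interval "-").getD [] with
        | [start_str, end_str] =>
          (st.1 ++ [(pvHhmmToSlotA start_str sl, pvHhmmToSlotA end_str sl)],
           PySem.Set.update st.2 (PySem.List.pyRange (pvHhmmToSlotA start_str sl) (pvHhmmToSlotA end_str sl) 1))
        | _ => st) init).1 = init.1 ++ l.map (pvPair sl) := by
  intro l
  induction l with
  | nil => intro init _; simp
  | cons t rest ih =>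
    intro init h
    obtain ⟨x, y, hxy⟩ := List.length_eq_two.mp (h t (List.mem_cons_self ..))
    simp only [List.foldl_cons, hxy, List.map_cons]
    rw [ih _ (fun u hu => h u (List.mem_cons_of_mem _ hu))]
    simp [pvPair, hxy, pvSlot_eq]

-- B's per-officer fold over the raw comma-split list, in terms of the filtered pieces
theorem pvRowB_fold (sl : Int) :
    ∀ (l : List String) (init : List (Int × Int) × Int),
      (∀ t ∈ (l.map PySem.Str.strip).filter (fun t => t ≠ ""), ((PySem.Str.split? t "-").getD []).length = 2) →
      l.foldl (pvStepB sl) init =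
        (init.1 ++ ((l.map PySem.Str.strip).filter (fun t => t ≠ "")).map (pvPair sl),
         (((l.map PySem.Str.strip).filter (fun t => t ≠ "")).map (pvPair sl)).foldl
           (fun q iv => max q (pvThresh (iv.2 - iv.1))) init.2) := by
  intro l
  induction l with
  | nil => intro init _; simp
  | cons part rest ih =>
    intro init h
    by_cases hs : PySem.Str.strip part = ""
    · have hstep : pvStepB sl init part = init := by simp [pvStepB, hs]
      simp only [List.foldl_cons, hstep, List.map_cons, List.filter_cons]
      rw [if_neg (by simp [hs])]
      exact ih init (by simpa [hs] using h)
    · have hmem : PySem.Str.strip part ∈ (List.map PySem.Str.strip (part :: rest)).filter (fun t => t ≠ "") := by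
        simp [List.filter_cons, hs]
      obtain ⟨x, y, hxy⟩ := List.length_eq_two.mp (h _ hmem)
      have hstep : pvStepB sl init part =
          (init.1 ++ [pvPair sl (PySem.Str.strip part)],
           max init.2 (pvThresh ((pvPair sl (PySem.Str.strip part)).2 - (pvPair sl (PySem.Str.strip part)).1))) := by
        simp only [pvStepB, pvPair, pvThresh, hxy, if_neg hs]
      simp only [List.foldl_cons, hstep, List.map_cons, List.filter_cons]
      rw [if_pos (by simp [hs])]
      rw [ih _ (by intro u hu; exact h u (by simp [List.filter_cons, hs]; right; simpa [hs] using hu))]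
      simp [List.map_cons, List.foldl_cons]

-- per-string summary: B's fused row equals (A's intervals, A's break loop on them)
theorem pvRow_eq_parse (sl : Int) (a : String)
    (h : ∀ t ∈ (((PySem.Str.split? a ",").getD []).map PySem.Str.strip).filter (fun t => t ≠ ""),
      ((PySem.Str.split? t "-").getD []).length = 2) :
    pvRowB sl a = ((pvParseOfficerA a sl).1, pvBreakLoopA (pvParseOfficerA a sl).1 0) := by
  have h1 := pvParseA_fst sl
    ((((PySem.Str.split? a ",").getD []).map PySem.Str.strip).filter (fun t => t ≠ ""))
    ([], PySem.Set.empty) h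
  have h2 := pvRowB_fold sl ((PySem.Str.split? a ",").getD []) ([], 0) h
  have hA : (pvParseOfficerA a sl).1 =
      ((((PySem.Str.split? a ",").getD []).map PySem.Str.strip).filter (fun t => t ≠ "")).map (pvPair sl) := by
    simpa [pvParseOfficerA] using h1
  rw [pvRowB, h2, hA, pvBreakLoopA_eq_foldl _ 0 le_rfl (by omega)]
  simp

theorem build_model_inputs_main (ia : List String) (sl : Int)
    (hpre : Pre_build_model_inputs ia sl) :
    build_model_inputs ia sl = build_model_inputs_alt ia sl := by
  have hlen : (pvOfficersA ia.length).length = ia.length := pvOfficersA_length _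
  have hnd : (pvOfficersA ia.length).Nodup := pvOfficersA_nodup _
  have hrow : ∀ s ∈ ia, pvRowB sl s = ((pvParseOfficerA s sl).1, pvBreakLoopA (pvParseOfficerA s sl).1 0) :=
    fun s hs => pvRow_eq_parse sl s (fun t ht => (hpre s hs t ht).1)
  -- A's loop over enumerate, componentized into two identical dict folds
  have hAfold : (PySem.List.enumerate ia).foldl (pvStepTopA (pvOfficersA ia.length) sl) (PySem.Dict.empty, PySem.Dict.empty)
      = ((PySem.List.enumerate ia).foldl (fun (d : PySem.Dict String (List (Int × Int))) (p : Int × String) => d.insert ((PySem.List.pyGet? (pvOfficersA ia.length) p.1).getD "") (pvParseOfficerA p.2 sl).1) PySem.Dict.empty,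
         (PySem.List.enumerate ia).foldl (fun (d : PySem.Dict String (List (Int × Int))) (p : Int × String) => d.insert ((PySem.List.pyGet? (pvOfficersA ia.length) p.1).getD "") (pvParseOfficerA p.2 sl).1) PySem.Dict.empty) :=
    PySem.List.foldl_prod_mk
      (f := fun (d : PySem.Dict String (List (Int × Int))) (p : Int × String) => d.insert ((PySem.List.pyGet? (pvOfficersA ia.length) p.1).getD "") (pvParseOfficerA p.2 sl).1)
      (g := fun (d : PySem.Dict String (List (Int × Int))) (p : Int × String) => d.insert ((PySem.List.pyGet? (pvOfficersA ia.length) p.1).getD "") (pvParseOfficerA p.2 sl).1)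
      _ _ _
  -- B's loop over zip, componentized
  have hBfold : ((pvOfficersA ia.length).zip ia).foldl (pvStepTopB sl) (PySem.Dict.empty, PySem.Dict.empty)
      = (((pvOfficersA ia.length).zip ia).foldl (fun (d : PySem.Dict String (List (Int × Int))) (p : String × String) => d.insert p.1 (pvRowB sl p.2).1) PySem.Dict.empty,
         ((pvOfficersA ia.length).zip ia).foldl (fun (d : PySem.Dict String Int) (p : String × String) => d.insert p.1 (pvRowB sl p.2).2) PySem.Dict.empty) :=
    PySem.List.foldl_prod_mk
      (f := fun (d : PySem.Dict String (List (Int × Int))) (p : String × String) => d.insert p.1 (pvRowB sl p.2).1)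
      (g := fun (d : PySem.Dict String Int) (p : String × String) => d.insert p.1 (pvRowB sl p.2).2)
      _ _ _
  -- the officer-name lookups along A's loop are exactly the officers list
  have hmapA : (PySem.List.enumerate ia).map (fun p : Int × String => (PySem.List.pyGet? (pvOfficersA ia.length) p.1).getD "") = pvOfficersA ia.length := by
    apply List.ext_getElem
    · simp [hlen]
    · intro j h1 h2
      have hj : j < ia.length := by simpa using h1
      simp [PySem.List.getElem_enumerate, List.getElem?_eq_getElem (hlen ▸ hj)]
  -- items of the three dict folds
  have hItemsA : ((PySem.List.enumerate ia).foldl (fun (d : PySem.Dict String (List (Int × Int))) (p : Int × String) => d.insert ((PySem.List.pyGet? (pvOfficersA ia.length) p.1).getD "") (pvParseOfficerA p.2 sl).1) PySem.Dict.empty).items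
      = (PySem.List.enumerate ia).map (fun p : Int × String => (((PySem.List.pyGet? (pvOfficersA ia.length) p.1).getD ""), (pvParseOfficerA p.2 sl).1)) := by
    simpa using PySem.Dict.items_foldl_insert_fresh (PySem.List.enumerate ia)
      (fun p : Int × String => (PySem.List.pyGet? (pvOfficersA ia.length) p.1).getD "")
      (fun p : Int × String => (pvParseOfficerA p.2 sl).1) PySem.Dict.empty
      (by intro a _; exact PySem.Dict.contains_empty _) (by rw [hmapA]; exact hnd)
  have hItemsB1 : (((pvOfficersA ia.length).zip ia).foldl (fun (d : PySem.Dict String (List (Int × Int))) (p : String × String) => d.insert p.1 (pvRowB sl p.2).1) PySem.Dict.empty).items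
      = ((pvOfficersA ia.length).zip ia).map (fun p : String × String => (p.1, (pvRowB sl p.2).1)) := by
    simpa using PySem.Dict.items_foldl_insert_fresh ((pvOfficersA ia.length).zip ia)
      Prod.fst (fun p : String × String => (pvRowB sl p.2).1) PySem.Dict.empty
      (by intro a _; exact PySem.Dict.contains_empty _)
      (by rw [List.map_fst_zip (le_of_eq hlen)]; exact hnd)
  have hItemsB2 : (((pvOfficersA ia.length).zip ia).foldl (fun (d : PySem.Dict String Int) (p : String × String) => d.insert p.1 (pvRowB sl p.2).2) PySem.Dict.empty).items
      = ((pvOfficersA ia.length).zip ia).map (fun p : String × String => (p.1, (pvRowB sl p.2).2)) := by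
    simpa using PySem.Dict.items_foldl_insert_fresh ((pvOfficersA ia.length).zip ia)
      Prod.fst (fun p : String × String => (pvRowB sl p.2).2) PySem.Dict.empty
      (by intro a _; exact PySem.Dict.contains_empty _)
      (by rw [List.map_fst_zip (le_of_eq hlen)]; exact hnd)
  -- A's item list equals B's availability item list
  have hLAB : (PySem.List.enumerate ia).map (fun p : Int × String => (((PySem.List.pyGet? (pvOfficersA ia.length) p.1).getD ""), (pvParseOfficerA p.2 sl).1))
      = ((pvOfficersA ia.length).zip ia).map (fun p : String × String => (p.1, (pvRowB sl p.2).1)) := by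
    apply List.ext_getElem
    · simp [hlen]
    · intro j h1 h2
      have hj : j < ia.length := by simpa using h1
      simp only [List.getElem_map, PySem.List.getElem_enumerate, List.getElem_zip]
      refine Prod.ext ?_ ?_
      · simp [List.getElem?_eq_getElem (hlen ▸ hj)]
      · have h3 := hrow (ia[j]'hj) (List.getElem_mem hj)
        simp [h3]
  -- the availability dict, as built by either port
  set DA := (PySem.List.enumerate ia).foldl (fun (d : PySem.Dict String (List (Int × Int))) (p : Int × String) => d.insert ((PySem.List.pyGet? (pvOfficersA ia.length) p.1).getD "") (pvParseOfficerA p.2 sl).1) PySem.Dict.empty with hDA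
  have hDAitems : DA.items = ((pvOfficersA ia.length).zip ia).map (fun p : String × String => (p.1, (pvRowB sl p.2).1)) :=
    hItemsA.trans hLAB
  have hDAkeys : DA.keys = pvOfficersA ia.length := by
    rw [show DA.keys = DA.items.map (fun q => q.1) from rfl, hDAitems, List.map_map]
    simpa using List.map_fst_zip (le_of_eq hlen)
  have hDAget : ∀ (j : Nat) (hj : j < ia.length), DA.get? ((pvOfficersA ia.length)[j]'(by rw [hlen]; exact hj)) = some ((pvRowB sl (ia[j]'hj)).1) := by
    intro j hj
    apply PySem.Dict.get?_of_mem_items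
    · rw [hDAitems]
      refine List.mem_map.mpr ⟨((pvOfficersA ia.length).zip ia)[j]'(by simp only [List.length_zip, hlen, min_self]; exact hj), List.getElem_mem _, ?_⟩
      simp [List.getElem_zip]
    · rw [hDAkeys]; exact hnd
  -- A's break dict
  have hBreakA : (pvCalcTotalBreak2 DA).items = (pvOfficersA ia.length).map (fun o => (o, pvBreakLoopA ((DA.get? o).getD []) 0)) := by
    unfold pvCalcTotalBreak2
    rw [hDAkeys]
    simpa using PySem.Dict.items_foldl_insert_fresh (pvOfficersA ia.length)
      (fun o => o) (fun o => pvBreakLoopA ((DA.get? o).getD []) 0) PySem.Dict.empty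
      (by intro a _; exact PySem.Dict.contains_empty _) (by simpa using hnd)
  have hBreakEq : (pvOfficersA ia.length).map (fun o => (o, pvBreakLoopA ((DA.get? o).getD []) 0))
      = ((pvOfficersA ia.length).zip ia).map (fun p : String × String => (p.1, (pvRowB sl p.2).2)) := by
    apply List.ext_getElem
    · simp [hlen]
    · intro j h1 h2
      have hj : j < ia.length := by simpa [hlen] using h1
      simp only [List.getElem_map, List.getElem_zip]
      refine Prod.ext rfl ?_
      rw [hDAget j hj, hrow (ia[j]'hj) (List.getElem_mem hj)]
      simp
  -- assemble
  simp only [build_model_inputs, build_model_inputs_alt, pvOfficersB_eq]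
  rw [hAfold, hBfold]
  refine Prod.ext rfl (Prod.ext rfl (Prod.ext ?_ ?_))
  · exact hDAitems.trans hItemsB1.symm
  · exact (hBreakA.trans hBreakEq).trans hItemsB2.symm

-- ===== VERDICT (by name: the statement is the Claim_ definition above) =====
theorem build_model_inputs_spec : Claim_equal_build_model_inputs := by
  intro input_avail slot_length _ hpre
  unfold Spec_build_model_inputs
  exact build_model_inputs_main input_avail slot_length hpre
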